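-- pv_equiv track=rewrite | github.com/seungh0/programmers-algorithm | 20200722/printer.py | make_sorted_queue
-- ===== SOURCE A (Python) =====
-- EMPTY = -1000000
--
-- def make_sorted_queue(priorities):
--     index = 0
--     queue = []
--     for _ in priorities:
--         index = findMaxIndex(priorities, index)
--         queue.append(index)
--         priorities[index] = EMPTY  # to maintain the index, insert EMPTY number
--     return queue
--
-- def findMaxIndex(arr, start_idx):
--     max_value = arr[start_idx]
--     index = start_idx
--     for _ in arr:
--         if max_value < arr[start_idx]:
--             max_value = arr[start_idx]
--             index = start_idx
--         start_idx = increase(start_idx, arr)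
--     return index
--
-- def increase(index, arr):
--     index += 1
--     if index >= len(arr):
--         index = 0
--     return index
-- ===== SOURCE B (Python) =====
-- # B: group indices by value, emit groups in descending value order, each group
-- # rotated to start at the first index >= the previously emitted index.
-- # Unlike A, B does not mutate its argument (A overwrites priorities with EMPTY).
-- def make_sorted_queue(priorities):
--     groups = {}
--     for i, v in enumerate(priorities):
--         groups.setdefault(v, []).append(i)
--     queue = []
--     start = 0
--     for v in sorted(groups, reverse=True):
--         idxs = groups[v]
--         rotated = [i for i in idxs if i >= start] + [i for i in idxs if i < start]
--         queue += rotated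
--         start = rotated[-1]
--     return queue
-- ===== Notes on version B (the rewrite author's own statement) =====
-- stated objective: faster
-- what changed: Replaces A's n rounds of circular argmax over a sentinel-mutated array by one grouping pass over the indices plus one sort of the distinct values, emitting each value group rotated to start at the first index past the previously emitted one; B also does not mutate its argument where A overwrites it with EMPTY.
-- intended difference: On lists of length >= 2 containing an element <= -1000000 (A's EMPTY sentinel), A can no longer tell already-picked slots from real data and returns repeated indices (e.g. [5, -1000000] -> [0, 0]); B returns the intended permutation of all indices ([0, 1]), which is what the printer-queue task requires. — e.g. on make_sorted_queue([5, -1000000]): A returns [0, 0], B returns [0, 1]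
import Mathlib
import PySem

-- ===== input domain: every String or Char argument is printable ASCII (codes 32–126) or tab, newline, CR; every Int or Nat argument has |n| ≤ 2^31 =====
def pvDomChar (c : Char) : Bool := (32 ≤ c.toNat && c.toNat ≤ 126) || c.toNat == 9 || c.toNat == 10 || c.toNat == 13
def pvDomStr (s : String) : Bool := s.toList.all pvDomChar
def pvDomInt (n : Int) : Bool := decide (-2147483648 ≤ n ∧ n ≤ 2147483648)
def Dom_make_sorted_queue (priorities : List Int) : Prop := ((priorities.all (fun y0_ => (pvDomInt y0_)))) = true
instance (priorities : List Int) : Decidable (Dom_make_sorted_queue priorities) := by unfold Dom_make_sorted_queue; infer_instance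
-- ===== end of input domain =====

-- B: one grouping pass + one sort of the distinct values instead of A's n circular argmax
-- scans over a sentinel-mutated array (return value only: A also overwrites its argument with EMPTY, B does not).

-- ===== PORT A =====
def pvEMPTY : Int := -1000000

def pvIncrease (index : Int) (arr : List Int) : Int :=
  let index' := index + 1
  if (arr.length : Int) ≤ index' then 0 else index'

-- state (max_value, index, start_idx); arr[start_idx] is always in range when
-- reached from make_sorted_queue, so the .getD 0 default is never used there
def pvFindMaxIndex (arr : List Int) (start_idx : Int) : Int :=
  (arr.foldl
    (fun (st : Int × Int × Int) _ =>
      let cur := (PySem.List.pyGet? arr st.2.2).getD 0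
      let mi := if st.1 < cur then (cur, st.2.2) else (st.1, st.2.1)
      (mi.1, mi.2, pvIncrease st.2.2 arr))
    ((PySem.List.pyGet? arr start_idx).getD 0, start_idx, start_idx)).2.1

-- state (index, queue, priorities); priorities[index] = EMPTY with 0 ≤ index < len is List.set
def make_sorted_queue (priorities : List Int) : List Int :=
  (priorities.foldl
    (fun (st : Int × List Int × List Int) _ =>
      let index := pvFindMaxIndex st.2.2 st.1
      (index, st.2.1 ++ [index], st.2.2.set index.toNat pvEMPTY))
    ((0 : Int), ([] : List Int), priorities)).2.1

-- ===== PORT B =====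
def make_sorted_queue_alt (priorities : List Int) : List Int :=
  let groups : PySem.Dict Int (List Int) :=
    (PySem.List.enumerate priorities).foldl
      (fun d iv => d.modify iv.2 [] (fun l => l ++ [iv.1])) PySem.Dict.empty
  ((PySem.List.sorted groups.keys (fun x => x) true).foldl
    (fun (st : List Int × Int) v =>
      let idxs := groups.getD v []
      let rotated := idxs.filter (fun i => decide (st.2 ≤ i)) ++ idxs.filter (fun i => decide (i < st.2))
      (st.1 ++ rotated, (PySem.List.pyGet? rotated (-1)).getD 0))
    (([] : List Int), (0 : Int))).1

-- ===== PRECONDITION & SPEC =====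
-- On lists of length ≥ 2 containing an element ≤ -1000000 (A's EMPTY sentinel), A can no
-- longer tell already-picked slots from real data and returns repeated indices; B returns
-- the intended permutation of all indices, which is what the printer-queue task requires.
def D_make_sorted_queue (priorities : List Int) : Prop :=
  2 ≤ priorities.length ∧ ∃ x ∈ priorities, x ≤ -1000000
instance (priorities : List Int) : Decidable (D_make_sorted_queue priorities) := by
  unfold D_make_sorted_queue; infer_instance

def Spec_make_sorted_queue (priorities : List Int) (out : List Int) : Prop :=
  ¬ D_make_sorted_queue priorities → out = make_sorted_queue_alt priorities
instance (priorities : List Int) (out : List Int) : Decidable (Spec_make_sorted_queue priorities out) := by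
  unfold Spec_make_sorted_queue; infer_instance

def pvDiffWitness_make_sorted_queue : List Int := [5, -1000000]
def pvDiffWitnessOut_make_sorted_queue : (List Int) × (List Int) := ([0, 0], [0, 1])

-- ===== CLAIM (what is proved, stated in full; the proofs are below) =====
def Claim_unchanged_make_sorted_queue : Prop := ∀ (priorities : List Int), Dom_make_sorted_queue priorities → Spec_make_sorted_queue priorities (make_sorted_queue priorities)
def Claim_changed_make_sorted_queue : Prop := Dom_make_sorted_queue (pvDiffWitness_make_sorted_queue) ∧ D_make_sorted_queue (pvDiffWitness_make_sorted_queue) ∧ make_sorted_queue (pvDiffWitness_make_sorted_queue) = pvDiffWitnessOut_make_sorted_queue.1 ∧ make_sorted_queue_alt (pvDiffWitness_make_sorted_queue) = pvDiffWitnessOut_make_sorted_queue.2 ∧ pvDiffWitnessOut_make_sorted_queue.1 ≠ pvDiffWitnessOut_make_sorted_queue.2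

-- ===== LEMMAS AND PROOFS =====

-- ---- generic helpers ----
lemma pvGetD_lt {l : List Int} {i : Nat} (h : i < l.length) : l.getD i 0 = l[i] := by
  simp [List.getD_eq_getElem?_getD, List.getElem?_eq_getElem h]

lemma pvGetD_set {l : List Int} {g i : Nat} {e : Int} (hi : i < l.length) :
    (l.set g e).getD i 0 = if i = g then (if g < l.length then e else l.getD i 0) else l.getD i 0 := by
  rcases eq_or_ne i g with rfl | hne
  · rw [if_pos rfl, if_pos hi, pvGetD_lt (l := l.set i e) (by simpa using hi)]
    simp
  · rw [if_neg hne, List.getD_eq_getElem?_getD, List.getD_eq_getElem?_getD,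
        List.getElem?_set_ne (Ne.symm hne)]

lemma pvLast_int (l : List Int) (h : l ≠ []) :
    (PySem.List.pyGet? l (-1)).getD 0 = l.getLast?.getD 0 := by
  induction l using List.reverseRecOn with
  | nil => exact absurd rfl h
  | append_singleton l' a _ =>
      rw [PySem.List.pyGet?_neg_one_append_singleton]
      simp

-- ---- A as a fuelled loop ----
def pvLoopA : Nat → Int → List Int → List Int
  | 0, _, _ => []
  | k+1, s, arr =>
      let i := pvFindMaxIndex arr s
      i :: pvLoopA k i (arr.set i.toNat pvEMPTY)

lemma pvFoldA (l : List Int) : ∀ (s : Int) (q arr : List Int),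
    (l.foldl (fun (st : Int × List Int × List Int) _ =>
      let index := pvFindMaxIndex st.2.2 st.1
      (index, st.2.1 ++ [index], st.2.2.set index.toNat pvEMPTY)) (s, q, arr)).2.1
    = q ++ pvLoopA l.length s arr := by
  induction l with
  | nil => intro s q arr; simp [pvLoopA]
  | cons x t ih =>
      intro s q arr
      simp only [List.foldl_cons, List.length_cons, pvLoopA]
      rw [ih]
      simp

lemma pvA_eq_loopA (p : List Int) : make_sorted_queue p = pvLoopA p.length 0 p := by
  unfold make_sorted_queue
  rw [pvFoldA]
  simp

-- ---- the circular scan inside findMaxIndex ----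
def pvStep2 (arr : List Int) (st : Int × Int) (pos : Nat) : Int × Int :=
  if st.1 < arr.getD pos 0 then (arr.getD pos 0, (pos : Int)) else st

def pvPosSeq (n : Nat) : Nat → Nat → List Nat
  | 0, _ => []
  | m+1, s => s :: pvPosSeq n m (if n ≤ s + 1 then 0 else s + 1)

lemma pvInc_cast (arr : List Int) (s : Nat) :
    pvIncrease (s : Int) arr = (((if arr.length ≤ s + 1 then 0 else s + 1) : Nat) : Int) := by
  simp only [pvIncrease]
  by_cases h : arr.length ≤ s + 1
  · rw [if_pos h, if_pos (by exact_mod_cast h)]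
    simp
  · rw [if_neg h, if_neg (by exact_mod_cast h)]
    push_cast
    ring

lemma pvFold32 (arr : List Int) (l : List Int) : ∀ (mv ix : Int) (s : Nat), s < arr.length →
    (l.foldl (fun (st : Int × Int × Int) _ =>
      let cur := (PySem.List.pyGet? arr st.2.2).getD 0
      let mi := if st.1 < cur then (cur, st.2.2) else (st.1, st.2.1)
      (mi.1, mi.2, pvIncrease st.2.2 arr)) (mv, ix, (s : Int))).2.1
    = ((pvPosSeq arr.length l.length s).foldl (pvStep2 arr) (mv, ix)).2 := by
  induction l with
  | nil => intro mv ix s hs; simp [pvPosSeq]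
  | cons x t ih =>
      intro mv ix s hs
      have hget : (PySem.List.pyGet? arr ((s : Nat) : Int)).getD 0 = arr.getD s 0 := by simp
      have hs' : (if arr.length ≤ s + 1 then 0 else s + 1) < arr.length := by
        split_ifs <;> omega
      simp only [List.foldl_cons, List.length_cons, pvPosSeq, hget, pvInc_cast]
      exact ih _ _ _ hs'

lemma pvPosSeq_eq (n m : Nat) : ∀ s, s < n →
    pvPosSeq n m s = (List.range m).map (fun j => (s + j) % n) := by
  induction m with
  | zero => intro s hs; simp [pvPosSeq]
  | succ k ih =>
      intro s hs
      have hs' : (if n ≤ s + 1 then 0 else s + 1) < n := by split_ifs <;> omega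
      rw [pvPosSeq, ih _ hs', List.range_succ_eq_map]
      simp only [List.map_cons, List.map_map]
      congr 1
      · rw [Nat.add_zero, Nat.mod_eq_of_lt hs]
      · apply List.map_congr_left
        intro j _
        simp only [Function.comp]
        by_cases h : n ≤ s + 1
        · rw [if_pos h]
          rw [show s + (j + 1) = n + j by omega, Nat.add_mod_left]
          simp
        · rw [if_neg h]
          congr 1
          omega

lemma pvFold_no_improve {β : Type} (f g : β → Int) (l : List β) : ∀ (mv ix : Int),
    (∀ x ∈ l, f x ≤ mv) →
    l.foldl (fun st x => if st.1 < f x then (f x, g x) else st) (mv, ix) = (mv, ix) := by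
  induction l with
  | nil => intro mv ix _; rfl
  | cons a t ih =>
      intro mv ix h
      simp only [List.foldl_cons]
      rw [if_neg (not_lt.mpr (h a (List.mem_cons_self)))]
      exact ih _ _ (fun x hx => h x (List.mem_cons_of_mem _ hx))

lemma pvFold_fst_lt {β : Type} (f g : β → Int) (l : List β) : ∀ (mv ix v : Int),
    mv < v → (∀ x ∈ l, f x < v) →
    (l.foldl (fun st x => if st.1 < f x then (f x, g x) else st) (mv, ix)).1 < v := by
  induction l with
  | nil => intro mv ix v h _; simpa using h
  | cons a t ih =>
      intro mv ix v hmv h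
      simp only [List.foldl_cons]
      by_cases hc : ((mv, ix) : Int × Int).1 < f a
      · rw [if_pos hc]
        exact ih _ _ _ (h a (List.mem_cons_self)) (fun x hx => h x (List.mem_cons_of_mem _ hx))
      · rw [if_neg hc]
        exact ih _ _ _ hmv (fun x hx => h x (List.mem_cons_of_mem _ hx))

lemma pvFold_hit {β : Type} (f g : β → Int) (l1 l2 : List β) (b : β) (mv ix v : Int)
    (h1 : ∀ x ∈ l1, f x < v) (hmv : mv < v) (hb : f b = v) (h2 : ∀ x ∈ l2, f x ≤ v) :
    (l1 ++ b :: l2).foldl (fun st x => if st.1 < f x then (f x, g x) else st) (mv, ix) = (v, g b) := by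
  rw [List.foldl_append]
  have hr : (l1.foldl (fun st x => if st.1 < f x then (f x, g x) else st) (mv, ix)).1 < v :=
    pvFold_fst_lt f g l1 mv ix v hmv h1
  simp only [List.foldl_cons]
  rw [if_pos (by rw [hb]; exact hr), hb]
  exact pvFold_no_improve f g l2 v (g b) h2

def pvBetween (s g i : Nat) : Prop := (s ≤ i ∧ i < g) ∨ (g < s ∧ (s ≤ i ∨ i < g))

lemma pvFm_char (arr : List Int) (s g : Nat) (v : Int)
    (hs : s < arr.length) (hg : g < arr.length)
    (hmax : ∀ i, i < arr.length → arr.getD i 0 ≤ v)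
    (hgv : arr.getD g 0 = v)
    (hbef : ∀ i, i < arr.length → pvBetween s g i → arr.getD i 0 < v) :
    pvFindMaxIndex arr (s : Int) = (g : Int) := by
  have hn : 0 < arr.length := lt_of_le_of_lt (Nat.zero_le _) hs
  unfold pvFindMaxIndex
  have hget : (PySem.List.pyGet? arr ((s : Nat) : Int)).getD 0 = arr.getD s 0 := by simp
  rw [hget, pvFold32 arr arr _ _ s hs, pvPosSeq_eq _ _ _ hs, List.foldl_map]
  simp only [pvStep2]
  by_cases hsg : g = s
  · subst hsg
    have hfold := pvFold_no_improve (fun j => arr.getD ((g + j) % arr.length) 0)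
        (fun j => (((g + j) % arr.length : Nat) : Int)) (List.range arr.length)
        (arr.getD g 0) ((g : Nat) : Int)
        (fun j _ => by
          show arr.getD ((g + j) % arr.length) 0 ≤ arr.getD g 0
          rw [hgv]
          exact hmax _ (Nat.mod_lt _ hn))
    simp only [] at hfold
    rw [hfold]
  · set n := arr.length with hn_def
    set d := if s ≤ g then g - s else g + n - s with hd
    have hgn : g < n := hg
    have hsn : s < n := hs
    have hdlt : d < n := by rw [hd]; split_ifs <;> omega
    have hdpos : 0 < d := by rw [hd]; split_ifs <;> omega
    have hmod : (s + d) % n = g := by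
      rw [hd]; split_ifs with h
      · rw [show s + (g - s) = g by omega]; exact Nat.mod_eq_of_lt hgn
      · rw [show s + (g + n - s) = g + n by omega, Nat.add_mod_right]
        exact Nat.mod_eq_of_lt hgn
    have hbefj : ∀ j, j < d → pvBetween s g ((s + j) % n) := by
      intro j hj
      rw [hd] at hj; split_ifs at hj with h
      · rw [Nat.mod_eq_of_lt (by omega)]; left; omega
      · by_cases h2 : s + j < n
        · rw [Nat.mod_eq_of_lt h2]; right; exact ⟨by omega, Or.inl (by omega)⟩
        · have heq : (s + j) % n = s + j - n := by
            rw [Nat.mod_eq_sub_mod (by omega), Nat.mod_eq_of_lt (by omega)]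
          rw [heq]; right; exact ⟨by omega, Or.inr (by omega)⟩
    have hrange : List.range n = List.range d ++ d :: (List.range (n - d - 1)).map (fun j => d + 1 + j) := by
      conv_lhs => rw [show n = (d + 1) + (n - d - 1) by omega]
      rw [List.range_add, List.range_succ]
      simp [List.append_assoc]
    have hfold := pvFold_hit (fun j => arr.getD ((s + j) % n) 0)
        (fun j => (((s + j) % n : Nat) : Int))
        (List.range d) ((List.range (n - d - 1)).map (fun j => d + 1 + j)) d
        (arr.getD s 0) ((s : Nat) : Int) v
        (fun j hj => hbef _ (Nat.mod_lt _ hn) (hbefj j (List.mem_range.mp hj)))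
        (by
          refine hbef s hs ?_
          unfold pvBetween
          omega)
        (by
          show arr.getD ((s + d) % n) 0 = v
          rw [hmod]; exact hgv)
        (fun j _ => hmax _ (Nat.mod_lt _ hn))
    simp only [] at hfold
    rw [hrange, hfold]
    simp [hmod]

-- ---- positions of a value; circular rotation ----
def pvPos (q : List Int) (v : Int) : List Nat :=
  (List.range q.length).filter (fun i => q.getD i 0 == v)

def pvRotN (C : List Nat) (s : Nat) : List Nat :=
  C.filter (fun i => decide (s ≤ i)) ++ C.filter (fun i => decide (i < s))

lemma pvMem_pos {q : List Int} {v : Int} {i : Nat} :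
    i ∈ pvPos q v ↔ i < q.length ∧ q.getD i 0 = v := by
  simp [pvPos]

lemma pvPos_sorted (q : List Int) (v : Int) : (pvPos q v).Pairwise (· < ·) :=
  List.Pairwise.filter _ List.pairwise_lt_range

lemma pvRot_perm (C : List Nat) (s : Nat) : (pvRotN C s).Perm C := by
  unfold pvRotN
  have h : C.filter (fun i => decide (i < s)) = C.filter (fun i => !decide (s ≤ i)) := by
    apply List.filter_congr
    intro x _
    by_cases h : s ≤ x <;> simp [h] <;> omega
  rw [h]
  exact List.filter_append_perm _ C

lemma pvRot_ne_nil {C : List Nat} {s : Nat} (h : C ≠ []) : pvRotN C s ≠ [] := by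
  intro hc
  apply h
  have hlen := (pvRot_perm C s).length_eq
  rw [hc] at hlen
  exact List.eq_nil_of_length_eq_zero (by simpa using hlen.symm)

lemma pvRot_head_first (C : List Nat) (s g : Nat) (t : List Nat)
    (hC : C.Pairwise (· < ·)) (hrot : pvRotN C s = g :: t) :
    ∀ i ∈ C, ¬ pvBetween s g i := by
  unfold pvRotN at hrot
  rcases hU : C.filter (fun i => decide (s ≤ i)) with _ | ⟨g', t'⟩
  · rw [hU, List.nil_append] at hrot
    have hall : ∀ i ∈ C, i < s := by
      intro i hi
      have := List.filter_eq_nil_iff.mp hU i hi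
      simpa using this
    have hLC : C.filter (fun i => decide (i < s)) = C :=
      List.filter_eq_self.mpr (fun i hi => by simpa using hall i hi)
    rw [hLC] at hrot
    intro i hi hb
    have hgC : g ∈ C := by rw [hrot]; exact List.mem_cons_self
    have hgs : g < s := hall g hgC
    have his : i < s := hall i hi
    rcases hb with ⟨h1, _⟩ | ⟨_, h2 | h2⟩
    · omega
    · omega
    · have hiC := hi
      rw [hrot] at hiC hC
      rcases List.mem_cons.mp hiC with rfl | hit
      · omega
      · have := (List.pairwise_cons.mp hC).1 i hit
        omega
  · have hg' : g' = g := by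
      rw [hU] at hrot
      simpa using congrArg (fun l => l.headI) hrot
    subst hg'
    have hgU : g' ∈ C.filter (fun i => decide (s ≤ i)) := by rw [hU]; exact List.mem_cons_self
    have hgs : s ≤ g' := by simpa using (List.mem_filter.mp hgU).2
    have hmin : ∀ x ∈ C, s ≤ x → g' ≤ x := by
      intro x hx hsx
      have hxU : x ∈ C.filter (fun i => decide (s ≤ i)) := List.mem_filter.mpr ⟨hx, by simpa using hsx⟩
      rw [hU] at hxU
      rcases List.mem_cons.mp hxU with rfl | hxt
      · exact le_refl _
      · have hpw : (C.filter (fun i => decide (s ≤ i))).Pairwise (· < ·) := List.Pairwise.filter _ hC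
        rw [hU] at hpw
        exact le_of_lt ((List.pairwise_cons.mp hpw).1 x hxt)
    intro i hi hb
    rcases hb with ⟨h1, h2⟩ | ⟨h1, _⟩
    · have := hmin i hi h1; omega
    · omega

lemma pvRot_tail (C : List Nat) (s g : Nat) (t : List Nat)
    (hC : C.Pairwise (· < ·)) (hrot : pvRotN C s = g :: t) :
    t = pvRotN (C.filter (fun i => decide (i ≠ g))) g := by
  have hgt : C.filter (fun i => decide (g < i))
      = (C.filter (fun i => decide (i ≠ g))).filter (fun i => decide (g ≤ i)) := by
    rw [List.filter_filter]
    apply List.filter_congr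
    intro x _
    by_cases h : g < x <;> simp [h] <;> omega
  have hlt : C.filter (fun i => decide (i < g))
      = (C.filter (fun i => decide (i ≠ g))).filter (fun i => decide (i < g)) := by
    rw [List.filter_filter]
    apply List.filter_congr
    intro x _
    by_cases h : x < g <;> simp [h] <;> omega
  unfold pvRotN at hrot ⊢
  rw [← hgt, ← hlt]
  rcases hU : C.filter (fun i => decide (s ≤ i)) with _ | ⟨g', t'⟩
  · rw [hU, List.nil_append] at hrot
    have hall : ∀ i ∈ C, i < s := by
      intro i hi
      have := List.filter_eq_nil_iff.mp hU i hi
      simpa using this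
    have hLC : C.filter (fun i => decide (i < s)) = C :=
      List.filter_eq_self.mpr (fun i hi => by simpa using hall i hi)
    rw [hLC] at hrot
    have hpw := hrot ▸ hC
    have htg : ∀ x ∈ t, g < x := (List.pairwise_cons.mp hpw).1
    have h1 : C.filter (fun i => decide (g < i)) = t := by
      rw [hrot, List.filter_cons_of_neg (by simp)]
      exact List.filter_eq_self.mpr (fun x hx => by simpa using htg x hx)
    have h2 : C.filter (fun i => decide (i < g)) = [] := by
      rw [hrot, List.filter_cons_of_neg (by simp)]
      apply List.filter_eq_nil_iff.mpr
      intro x hx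
      simp only [decide_eq_true_eq]
      exact not_lt.mpr (le_of_lt (htg x hx))
    rw [h1, h2, List.append_nil]
  · have hg' : g' = g := by
      rw [hU] at hrot
      simpa using congrArg (fun l => l.headI) hrot
    subst hg'
    have ht : t = t' ++ C.filter (fun i => decide (i < s)) := by
      rw [hU] at hrot
      simpa using hrot.symm
    have hgU : g' ∈ C.filter (fun i => decide (s ≤ i)) := by rw [hU]; exact List.mem_cons_self
    have hgs : s ≤ g' := by simpa using (List.mem_filter.mp hgU).2
    have hpwU : (C.filter (fun i => decide (s ≤ i))).Pairwise (· < ·) := List.Pairwise.filter _ hC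
    rw [hU] at hpwU
    have htg : ∀ x ∈ t', g' < x := (List.pairwise_cons.mp hpwU).1
    have hmin : ∀ x ∈ C, s ≤ x → g' ≤ x := by
      intro x hx hsx
      have hxU : x ∈ C.filter (fun i => decide (s ≤ i)) := List.mem_filter.mpr ⟨hx, by simpa using hsx⟩
      rw [hU] at hxU
      rcases List.mem_cons.mp hxU with rfl | hxt
      · exact le_refl _
      · exact le_of_lt (htg x hxt)
    have h1 : C.filter (fun i => decide (g' < i)) = t' := by
      have step1 : C.filter (fun i => decide (g' < i))
          = (C.filter (fun i => decide (s ≤ i))).filter (fun i => decide (g' < i)) := by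
        rw [List.filter_filter]
        apply List.filter_congr
        intro x _
        by_cases h : g' < x
        · simp [h, show s ≤ x by omega]
        · simp [h]
      rw [step1, hU, List.filter_cons_of_neg (by simp)]
      exact List.filter_eq_self.mpr (fun x hx => by simpa using htg x hx)
    have h2 : C.filter (fun i => decide (i < g')) = C.filter (fun i => decide (i < s)) := by
      apply List.filter_congr
      intro x hx
      by_cases h : x < s
      · simp [h, show x < g' by omega]
      · have hsx : s ≤ x := by omega
        have := hmin x hx hsx
        by_cases h3 : x < g' <;> simp [h3] <;> omega
    rw [h1, h2, ht]

-- ---- masking ----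
lemma pvPos_set {arr : List Int} {g : Nat} {v : Int} (hvE : pvEMPTY ≠ v) :
    pvPos (arr.set g pvEMPTY) v = (pvPos arr v).filter (fun i => decide (i ≠ g)) := by
  unfold pvPos
  rw [List.filter_filter, List.length_set]
  apply List.filter_congr
  intro i hi
  have hi' : i < arr.length := List.mem_range.mp hi
  rw [pvGetD_set hi']
  rcases eq_or_ne i g with rfl | hne
  · have hb : (pvEMPTY == v) = false := beq_eq_false_iff_ne.mpr hvE
    simp [hi', hb]
  · simp [hne]

lemma pvMask_set {arr : List Int} {g : Nat} {v : Int}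
    (hg : g < arr.length) (hgv : arr.getD g 0 = v) (hvE : pvEMPTY ≠ v) :
    (arr.set g pvEMPTY).map (fun x => if x = v then pvEMPTY else x)
      = arr.map (fun x => if x = v then pvEMPTY else x) := by
  rw [List.map_set, if_neg hvE]
  have hmap : (arr.map (fun x => if x = v then pvEMPTY else x))[g]'(by simpa using hg) = pvEMPTY := by
    rw [List.getElem_map]
    have hv : arr[g] = v := by rw [← pvGetD_lt hg]; exact hgv
    simp [hv]
  have hset : (arr.map (fun x => if x = v then pvEMPTY else x)).set g pvEMPTY
      = (arr.map (fun x => if x = v then pvEMPTY else x)).set g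
          ((arr.map (fun x => if x = v then pvEMPTY else x))[g]'(by simpa using hg)) := by
    rw [hmap]
  rw [hset]
  exact List.set_getElem_self _

lemma pvMask_id {arr : List Int} {v : Int}
    (h : ∀ i, i < arr.length → arr.getD i 0 ≠ v) :
    arr.map (fun x => if x = v then pvEMPTY else x) = arr := by
  have h2 := List.map_congr_left (l := arr) (f := fun x => if x = v then pvEMPTY else x)
    (g := id) (by
      intro x hx
      obtain ⟨i, hi, rfl⟩ := List.mem_iff_getElem.mp hx
      have hne : arr[i] ≠ v := by rw [← pvGetD_lt hi]; exact h i hi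
      simp [hne])
  simpa using h2

-- ---- the group-processing step of A ----
lemma pvGroup (v : Int) (hvE : pvEMPTY < v) :
    ∀ (rot : List Nat) (arr : List Int) (s : Nat) (rest : Nat),
    s < arr.length →
    (∀ i, i < arr.length → arr.getD i 0 ≤ v) →
    rot = pvRotN (pvPos arr v) s →
    pvLoopA (rot.length + rest) (s : Int) arr
      = rot.map (fun (i : Nat) => (i : Int))
        ++ pvLoopA rest ((rot.getLast?.getD s : Nat) : Int)
             (arr.map (fun x => if x = v then pvEMPTY else x)) := by
  intro rot
  induction rot with
  | nil =>
      intro arr s rest hs hmax hrot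
      have hC : pvPos arr v = [] := by
        by_contra hne
        exact pvRot_ne_nil hne hrot.symm
      have hnov : ∀ i, i < arr.length → arr.getD i 0 ≠ v := by
        intro i hi hv
        have hmem : i ∈ pvPos arr v := pvMem_pos.mpr ⟨hi, hv⟩
        rw [hC] at hmem
        simp at hmem
      rw [pvMask_id hnov]
      simp
  | cons g t ih =>
      intro arr s rest hs hmax hrot
      set C := pvPos arr v with hCdef
      have hCsorted : C.Pairwise (· < ·) := pvPos_sorted arr v
      have hgC : g ∈ C := ((pvRot_perm C s).mem_iff).mp (by rw [← hrot]; exact List.mem_cons_self)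
      have hgmem := pvMem_pos.mp hgC
      have hg : g < arr.length := hgmem.1
      have hgv : arr.getD g 0 = v := hgmem.2
      have hfm : pvFindMaxIndex arr (s : Int) = (g : Int) := by
        apply pvFm_char arr s g v hs hg hmax hgv
        intro i hi hbet
        rcases lt_or_eq_of_le (hmax i hi) with h | h
        · exact h
        · exact absurd hbet (pvRot_head_first C s g t hCsorted hrot.symm i (pvMem_pos.mpr ⟨hi, h⟩))
      have harr' : pvPos (arr.set g pvEMPTY) v = C.filter (fun i => decide (i ≠ g)) :=
        pvPos_set (ne_of_lt hvE)
      have ht : t = pvRotN (pvPos (arr.set g pvEMPTY) v) g := by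
        rw [harr']
        exact pvRot_tail C s g t hCsorted hrot.symm
      have hlen : (g :: t).length + rest = (t.length + rest) + 1 := by simp; omega
      rw [hlen]
      show pvLoopA ((t.length + rest) + 1) (s : Int) arr = _
      rw [pvLoopA]
      simp only [hfm]
      rw [show ((g : Int)).toNat = g from Int.toNat_natCast g]
      have hs'len : g < (arr.set g pvEMPTY).length := by simpa using hg
      have hmax' : ∀ i, i < (arr.set g pvEMPTY).length → (arr.set g pvEMPTY).getD i 0 ≤ v := by
        intro i hi
        have hi' : i < arr.length := by simpa using hi
        rw [pvGetD_set hi']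
        rcases eq_or_ne i g with rfl | hne
        · rw [if_pos rfl, if_pos hg]
          exact le_of_lt hvE
        · rw [if_neg hne]
          exact hmax i hi'
      have hih := ih (arr.set g pvEMPTY) g rest hs'len hmax' ht
      rw [hih, pvMask_set hg hgv (ne_of_lt hvE)]
      have hlast : (g :: t).getLast?.getD s = t.getLast?.getD g := by
        cases t with
        | nil => simp
        | cons b t' =>
            rw [List.getLast?_cons_cons]
            rcases Option.isSome_iff_exists.mp (List.getLast?_isSome.mpr (List.cons_ne_nil b t')) with ⟨a, ha⟩
            rw [ha]
            rfl
      rw [hlast]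
      simp

-- ---- the specification recursion shared by both reductions ----
def pvSpecQ (p : List Int) : List Int → Int → List Int
  | [], _ => []
  | v :: vs, s =>
      let idxs := (pvPos p v).map (fun (i : Nat) => (i : Int))
      let rot := idxs.filter (fun i => decide (s ≤ i)) ++ idxs.filter (fun i => decide (i < s))
      rot ++ pvSpecQ p vs ((PySem.List.pyGet? rot (-1)).getD 0)

lemma pvRotInt (C : List Nat) (s : Nat) :
    (C.map (fun (i : Nat) => (i : Int))).filter (fun i => decide ((s : Int) ≤ i))
      ++ (C.map (fun (i : Nat) => (i : Int))).filter (fun i => decide (i < (s : Int)))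
    = (pvRotN C s).map (fun (i : Nat) => (i : Int)) := by
  unfold pvRotN
  rw [List.filter_map, List.filter_map, List.map_append]
  congr 2 <;> apply List.filter_congr <;> intro x _ <;> simp [Function.comp]

lemma pvPos_sync {p arr : List Int} {v : Int} {vs : List Int}
    (hlen : arr.length = p.length)
    (hv : v ∈ vs)
    (hvE : pvEMPTY < v)
    (hinv : ∀ i, i < p.length →
      (if p.getD i 0 ∈ vs then arr.getD i 0 = p.getD i 0 else arr.getD i 0 = pvEMPTY)) :
    pvPos arr v = pvPos p v := by
  unfold pvPos
  rw [hlen]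
  apply List.filter_congr
  intro i hi
  have hi' : i < p.length := List.mem_range.mp hi
  have hii := hinv i hi'
  by_cases hmem : p.getD i 0 ∈ vs
  · rw [if_pos hmem] at hii
    rw [hii]
  · rw [if_neg hmem] at hii
    rw [hii]
    have h1 : (pvEMPTY == v) = false := beq_eq_false_iff_ne.mpr (ne_of_lt hvE)
    have h2 : (p.getD i 0 == v) = false := beq_eq_false_iff_ne.mpr (fun h => hmem (h ▸ hv))
    rw [h1, h2]

lemma pvMain (p : List Int) (hE : ∀ x ∈ p, pvEMPTY < x) :
    ∀ (vs : List Int), vs.Pairwise (fun a b => b < a) →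
    (∀ v ∈ vs, ∃ i, i < p.length ∧ p.getD i 0 = v) →
    ∀ (arr : List Int) (s : Nat),
    arr.length = p.length → s < p.length →
    (∀ i, i < p.length →
      (if p.getD i 0 ∈ vs then arr.getD i 0 = p.getD i 0 else arr.getD i 0 = pvEMPTY)) →
    pvLoopA (pvSpecQ p vs (s : Int)).length (s : Int) arr = pvSpecQ p vs (s : Int) := by
  intro vs
  induction vs with
  | nil =>
      intro _ _ arr s _ _ _
      simp [pvSpecQ, pvLoopA]
  | cons v vs' ih =>
      intro hpw hocc arr s hlen hs hinv
      obtain ⟨iv, hiv, hivv⟩ := hocc v List.mem_cons_self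
      have hvE : pvEMPTY < v := by
        have hmem : p.getD iv 0 ∈ p := by
          rw [pvGetD_lt hiv]; exact List.getElem_mem hiv
        exact hivv ▸ hE _ hmem
      have hsync : pvPos arr v = pvPos p v :=
        pvPos_sync hlen List.mem_cons_self hvE hinv
      set C := pvPos p v with hC
      have hCne : C ≠ [] := by
        intro hnil
        have hmem : iv ∈ C := pvMem_pos.mpr ⟨hiv, hivv⟩
        rw [hnil] at hmem
        simp at hmem
      set rotN := pvRotN C s with hrotN
      have hrotNe : rotN ≠ [] := pvRot_ne_nil hCne
      have hspec : pvSpecQ p (v :: vs') (s : Int)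
          = rotN.map (fun (i : Nat) => (i : Int))
            ++ pvSpecQ p vs' ((rotN.getLast?.getD s : Nat) : Int) := by
        show ((pvPos p v).map (fun (i : Nat) => (i : Int))).filter (fun i => decide ((s : Int) ≤ i))
              ++ ((pvPos p v).map (fun (i : Nat) => (i : Int))).filter (fun i => decide (i < (s : Int)))
              ++ pvSpecQ p vs' _ = _
        rw [pvRotInt]
        congr 1
        congr 1
        rw [pvLast_int _ (by simpa using hrotNe)]
        rcases Option.isSome_iff_exists.mp (List.getLast?_isSome.mpr hrotNe) with ⟨a, ha⟩
        rw [List.getLast?_map, ha]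
        simp
      rw [hspec]
      set s' := rotN.getLast?.getD s with hs'
      have hs'C : s' ∈ C := by
        rcases Option.isSome_iff_exists.mp (List.getLast?_isSome.mpr hrotNe) with ⟨a, ha⟩
        have hmem : a ∈ rotN := List.mem_of_getLast? ha
        rw [hs', ha]
        simpa using (pvRot_perm C s).mem_iff.mp hmem
      have hs'lt : s' < p.length := (pvMem_pos.mp hs'C).1
      have hmax : ∀ i, i < arr.length → arr.getD i 0 ≤ v := by
        intro i hi
        have hi' : i < p.length := by omega
        have hii := hinv i hi'
        by_cases hmem : p.getD i 0 ∈ v :: vs'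
        · rw [if_pos hmem] at hii
          rw [hii]
          rcases List.mem_cons.mp hmem with h | h
          · exact le_of_eq h
          · exact le_of_lt ((List.pairwise_cons.mp hpw).1 _ h)
        · rw [if_neg hmem] at hii
          rw [hii]
          exact le_of_lt hvE
      have hgrp := pvGroup v hvE rotN arr s (pvSpecQ p vs' ((s' : Nat) : Int)).length
        (by omega) hmax (by rw [hrotN, hsync])
      have hlenq : (rotN.map (fun (i : Nat) => (i : Int)) ++ pvSpecQ p vs' ((s' : Nat) : Int)).length
          = rotN.length + (pvSpecQ p vs' ((s' : Nat) : Int)).length := by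
        simp
      rw [hlenq, hgrp]
      congr 1
      apply ih (List.pairwise_cons.mp hpw).2
        (fun w hw => hocc w (List.mem_cons_of_mem _ hw))
        _ s' (by simpa using hlen) hs'lt
      intro i hi
      have hmask : (arr.map (fun x => if x = v then pvEMPTY else x)).getD i 0
          = (fun x => if x = v then pvEMPTY else x) (arr.getD i 0) := by
        have hi2 : i < arr.length := by omega
        rw [pvGetD_lt (l := arr.map fun x => if x = v then pvEMPTY else x) (by simpa using hi2),
            pvGetD_lt hi2, List.getElem_map]
      rw [hmask]
      have hii := hinv i hi
      have hvnot : v ∉ vs' := by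
        intro hmem
        have := (List.pairwise_cons.mp hpw).1 v hmem
        omega
      by_cases hmem : p.getD i 0 ∈ vs'
      · rw [if_pos hmem]
        rw [if_pos (List.mem_cons_of_mem _ hmem)] at hii
        have hne : arr.getD i 0 ≠ v := by
          rw [hii]; exact fun h => hvnot (h ▸ hmem)
        show (if arr.getD i 0 = v then pvEMPTY else arr.getD i 0) = p.getD i 0
        rw [if_neg hne, hii]
      · rw [if_neg hmem]
        show (if arr.getD i 0 = v then pvEMPTY else arr.getD i 0) = pvEMPTY
        by_cases hmem2 : p.getD i 0 ∈ v :: vs'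
        · rw [if_pos hmem2] at hii
          have hpv : p.getD i 0 = v := by
            rcases List.mem_cons.mp hmem2 with h | h
            · exact h
            · exact absurd h hmem
          rw [hii, hpv, if_pos rfl]
        · rw [if_neg hmem2] at hii
          rw [hii, if_neg (ne_of_lt hvE)]

-- ---- the B side: groups, keys, sort ----
lemma pvEnumFilter (q : List Int) (v : Int) : ∀ (s : Int),
    ((PySem.List.enumerate q s).filter (fun iv => iv.2 == v)).map (fun iv => iv.1)
      = ((List.range q.length).filter (fun i => q.getD i 0 == v)).map (fun (i : Nat) => s + (i : Int)) := by
  induction q with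
  | nil => intro s; simp [PySem.List.enumerate_nil]
  | cons x xs ih =>
      intro s
      rw [PySem.List.enumerate_cons, List.length_cons, List.range_succ_eq_map]
      have hpred : ∀ i : Nat, ((x :: xs).getD (Nat.succ i) 0 == v) = (xs.getD i 0 == v) := by
        intro i; rfl
      by_cases h : x = v
      · rw [List.filter_cons_of_pos (by simpa using h), List.filter_cons_of_pos (by simp [h])]
        rw [List.map_cons, List.map_cons, ih (s + 1), List.filter_map, List.map_map]
        have h1 : (List.range xs.length).filter ((fun i => (x :: xs).getD i 0 == v) ∘ Nat.succ)
            = (List.range xs.length).filter (fun i => xs.getD i 0 == v) :=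
          List.filter_congr (fun i _ => by simp [Function.comp])
        have h2 : ((fun (i : Nat) => s + (i : Int)) ∘ Nat.succ)
            = (fun (i : Nat) => (s + 1) + (i : Int)) := by
          funext i
          simp [Function.comp]
          ring
        rw [h1, h2]
        simp
      · rw [List.filter_cons_of_neg (by simpa using h), List.filter_cons_of_neg (by simp [h])]
        rw [ih (s + 1), List.filter_map, List.map_map]
        have h1 : (List.range xs.length).filter ((fun i => (x :: xs).getD i 0 == v) ∘ Nat.succ)
            = (List.range xs.length).filter (fun i => xs.getD i 0 == v) :=
          List.filter_congr (fun i _ => by simp [Function.comp])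
        have h2 : ((fun (i : Nat) => s + (i : Int)) ∘ Nat.succ)
            = (fun (i : Nat) => (s + 1) + (i : Int)) := by
          funext i
          simp [Function.comp]
          ring
        rw [h1, h2]

lemma pvGroupsGetD (p : List Int) (v : Int) :
    ((PySem.List.enumerate p).foldl
      (fun d iv => d.modify iv.2 [] (fun l => l ++ [iv.1])) PySem.Dict.empty).getD v []
    = (pvPos p v).map (fun (i : Nat) => (i : Int)) := by
  have hswap : (PySem.List.enumerate p).foldl
      (fun d iv => d.modify iv.2 [] (fun l => l ++ [iv.1])) PySem.Dict.empty
    = ((PySem.List.enumerate p).map Prod.swap).foldl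
      (fun d q => d.modify q.1 [] (fun l => l ++ [q.2])) PySem.Dict.empty := by
    rw [List.foldl_map]
    rfl
  rw [hswap, PySem.Dict.getD_foldl_modify_append]
  rw [List.filter_map, List.map_map]
  have h1 : ((PySem.List.enumerate p).filter ((fun q => q.1 == v) ∘ Prod.swap)).map ((fun q => q.2) ∘ Prod.swap)
      = ((PySem.List.enumerate p).filter (fun iv => iv.2 == v)).map (fun iv => iv.1) := by
    have hf : (((fun (q : Int × Int) => q.2) ∘ Prod.swap) : Int × Int → Int) = (fun iv => iv.1) := rfl
    have hp : (((fun (q : Int × Int) => q.1 == v) ∘ Prod.swap) : Int × Int → Bool)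
        = (fun (iv : Int × Int) => iv.2 == v) := rfl
    rw [hf, hp]
  rw [h1, pvEnumFilter p v 0, PySem.Dict.getD_empty, List.nil_append]
  unfold pvPos
  apply List.map_congr_left
  intro i _
  simp

lemma pvKeysLemma (p : List Int) :
    ((PySem.List.enumerate p).foldl
      (fun d iv => d.modify iv.2 [] (fun l => l ++ [iv.1])) PySem.Dict.empty).keys
    = PySem.Set.ofList p := by
  rw [PySem.Dict.keys_foldl_modify_key]
  rw [PySem.List.map_snd_enumerate]
  rw [PySem.Dict.keys_empty]
  rw [PySem.Set.ofList_eq_foldl]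
  rfl

lemma pvFoldB (p : List Int) (groups : PySem.Dict Int (List Int))
    (hg : ∀ v, groups.getD v [] = (pvPos p v).map (fun (i : Nat) => (i : Int))) :
    ∀ (vs : List Int) (acc : List Int) (s : Int),
    (vs.foldl (fun (st : List Int × Int) v =>
      let idxs := groups.getD v []
      let rotated := idxs.filter (fun i => decide (st.2 ≤ i)) ++ idxs.filter (fun i => decide (i < st.2))
      (st.1 ++ rotated, (PySem.List.pyGet? rotated (-1)).getD 0)) (acc, s)).1
    = acc ++ pvSpecQ p vs s := by
  intro vs
  induction vs with
  | nil => intro acc s; simp [pvSpecQ]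
  | cons v vs' ih =>
      intro acc s
      simp only [List.foldl_cons, hg v]
      rw [ih]
      show (acc ++ _) ++ pvSpecQ p vs' _ = _ ++ (_ ++ pvSpecQ p vs' _)
      rw [List.append_assoc]

lemma pvB_eq_spec (p : List Int) :
    make_sorted_queue_alt p
      = pvSpecQ p (PySem.List.sorted (PySem.Set.ofList p) (fun x => x) true) 0 := by
  unfold make_sorted_queue_alt
  show ((PySem.List.sorted ((PySem.List.enumerate p).foldl
      (fun d iv => d.modify iv.2 [] (fun l => l ++ [iv.1])) PySem.Dict.empty).keys (fun x => x) true).foldl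
      _ (([] : List Int), (0 : Int))).1 = _
  rw [pvKeysLemma]
  rw [pvFoldB p _ (fun v => pvGroupsGetD p v)]
  simp

-- ---- length of the specification output ----
lemma pvDisjFilterLen {α : Type} (l : List α) (a b : α → Bool)
    (hdisj : ∀ x ∈ l, ¬(a x = true ∧ b x = true)) :
    (l.filter (fun x => a x || b x)).length = (l.filter a).length + (l.filter b).length := by
  induction l with
  | nil => simp
  | cons x t ih =>
      have hd := hdisj x List.mem_cons_self
      have iht := ih (fun y hy => hdisj y (List.mem_cons_of_mem _ hy))
      by_cases ha : a x = true
      · have hb : b x = false := by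
          rcases Bool.eq_false_or_eq_true (b x) with h' | h'
          · exact absurd ⟨ha, h'⟩ hd
          · exact h'
        simp [ha, hb, iht]
        omega
      · have ha' : a x = false := by simpa using ha
        by_cases hb : b x = true
        · simp [ha', hb, iht]
          omega
        · have hb' : b x = false := by simpa using hb
          simp [ha', hb', iht]

lemma pvSpecLen (p : List Int) : ∀ (vs : List Int), vs.Pairwise (fun a b => b < a) → ∀ (s : Int),
    (pvSpecQ p vs s).length
      = ((List.range p.length).filter (fun i => decide (p.getD i 0 ∈ vs))).length := by
  intro vs
  induction vs with
  | nil => intro _ s; simp [pvSpecQ]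
  | cons v vs' ih =>
      intro hpw s
      have hvnot : v ∉ vs' := by
        intro hmem
        have := (List.pairwise_cons.mp hpw).1 v hmem
        omega
      show (((pvPos p v).map (fun (i : Nat) => (i : Int))).filter (fun i => decide (s ≤ i))
            ++ ((pvPos p v).map (fun (i : Nat) => (i : Int))).filter (fun i => decide (i < s))
            ++ pvSpecQ p vs' _).length = _
      rw [List.length_append, List.length_append, ih (List.pairwise_cons.mp hpw).2]
      have hrot : (((pvPos p v).map (fun (i : Nat) => (i : Int))).filter (fun i => decide (s ≤ i))).length
            + (((pvPos p v).map (fun (i : Nat) => (i : Int))).filter (fun i => decide (i < s))).length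
          = (pvPos p v).length := by
        have hcmpl : ((pvPos p v).map (fun (i : Nat) => (i : Int))).filter (fun i => decide (i < s))
            = ((pvPos p v).map (fun (i : Nat) => (i : Int))).filter (fun i => !decide (s ≤ i)) :=
          List.filter_congr (fun x _ => by
            by_cases hx : s ≤ x
            · simp [hx, not_lt.mpr hx]
            · simp [hx, not_le.mp hx])
        rw [← List.length_append, hcmpl, (List.filter_append_perm _ _).length_eq, List.length_map]
      rw [hrot]
      have hsplit : ((List.range p.length).filter (fun i => decide (p.getD i 0 ∈ v :: vs'))).length
          = ((List.range p.length).filter (fun i => p.getD i 0 == v)).length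
            + ((List.range p.length).filter (fun i => decide (p.getD i 0 ∈ vs'))).length := by
        have hcongr : (List.range p.length).filter (fun i => decide (p.getD i 0 ∈ v :: vs'))
            = (List.range p.length).filter (fun i => (p.getD i 0 == v) || decide (p.getD i 0 ∈ vs')) := by
          apply List.filter_congr
          intro i _
          rcases eq_or_ne (p.getD i 0) v with h | h
          · rw [h]
            simp [List.mem_cons]
          · have hb : (p.getD i 0 == v) = false := beq_eq_false_iff_ne.mpr h
            rw [hb]
            have h' : p[i]?.getD 0 ≠ v := by simpa [List.getD_eq_getElem?_getD] using h
            simp [List.mem_cons, h']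
        rw [hcongr]
        apply pvDisjFilterLen
        intro i _
        rintro ⟨h1, h2⟩
        have hv1 : p.getD i 0 = v := by simpa using h1
        have hv2 : p.getD i 0 ∈ vs' := by simpa using h2
        exact hvnot (hv1 ▸ hv2)
      rw [hsplit]
      rfl

-- ---- tiny inputs ----
lemma pvNil : make_sorted_queue [] = make_sorted_queue_alt [] := by decide

lemma pvSingle (x : Int) : make_sorted_queue [x] = make_sorted_queue_alt [x] := by
  have hA : make_sorted_queue [x] = [0] := by
    simp [make_sorted_queue, pvFindMaxIndex, pvIncrease, PySem.List.pyGet?, PySem.List.pyIdx?]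
  have hB : make_sorted_queue_alt [x] = [0] := by
    rw [pvB_eq_spec]
    have h1 : PySem.Set.ofList [x] = [x] := rfl
    have h2 : PySem.List.sorted [x] (fun y => y) true = [x] := rfl
    rw [h1, h2]
    have h3 : pvPos [x] x = [0] := by
      unfold pvPos
      simp [List.range_succ]
    show ((pvPos [x] x).map (fun (i : Nat) => (i : Int))).filter (fun i => decide ((0 : Int) ≤ i))
          ++ ((pvPos [x] x).map (fun (i : Nat) => (i : Int))).filter (fun i => decide (i < (0 : Int)))
          ++ pvSpecQ [x] [] _ = [0]
    rw [h3]
    simp [pvSpecQ]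
  rw [hA, hB]

-- ===== VERDICT (by name: the statement is the Claim_ definition above) =====
theorem make_sorted_queue_spec : Claim_unchanged_make_sorted_queue := by
  intro p _ hnD
  by_cases hall : ∀ x ∈ p, pvEMPTY < x
  · rcases eq_or_ne p [] with rfl | hne
    · exact pvNil
    · have hnlen : 0 < p.length := List.length_pos_iff.mpr hne
      set vs := PySem.List.sorted (PySem.Set.ofList p) (fun x => x) true with hvs
      have hperm : vs.Perm (PySem.Set.ofList p) := PySem.List.sorted_perm _ _ _
      have hmem : ∀ v, v ∈ vs ↔ v ∈ p := fun v => by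
        rw [hperm.mem_iff, PySem.Set.mem_ofList]
      have hnodup : vs.Nodup := hperm.nodup_iff.mpr (PySem.Set.nodup_ofList p)
      have hge : vs.Pairwise (fun a b => b ≤ a) := PySem.List.sorted_pairwise_rev _ _
      have hpw : vs.Pairwise (fun a b => b < a) :=
        (hge.and hnodup).imp (fun h => lt_of_le_of_ne h.1 (Ne.symm h.2))
      have hocc : ∀ v ∈ vs, ∃ i, i < p.length ∧ p.getD i 0 = v := by
        intro v hv
        obtain ⟨i, hi, rfl⟩ := List.mem_iff_getElem.mp ((hmem v).mp hv)
        exact ⟨i, hi, pvGetD_lt hi⟩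
      have hcov : ∀ i, i < p.length → p.getD i 0 ∈ vs := by
        intro i hi
        refine (hmem _).mpr ?_
        rw [pvGetD_lt hi]
        exact List.getElem_mem hi
      have hinv : ∀ i, i < p.length →
          (if p.getD i 0 ∈ vs then p.getD i 0 = p.getD i 0 else p.getD i 0 = pvEMPTY) := by
        intro i hi
        rw [if_pos (hcov i hi)]
      have hlen : (pvSpecQ p vs ((0 : Nat) : Int)).length = p.length := by
        rw [pvSpecLen p vs hpw]
        have hfil : (List.range p.length).filter (fun i => decide (p.getD i 0 ∈ vs)) = List.range p.length :=
          List.filter_eq_self.mpr (fun i hi => by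
            simpa using hcov i (List.mem_range.mp hi))
        rw [hfil, List.length_range]
      have hmain := pvMain p hall vs hpw hocc p 0 rfl hnlen hinv
      rw [hlen] at hmain
      show make_sorted_queue p = make_sorted_queue_alt p
      rw [pvA_eq_loopA, pvB_eq_spec]
      have h0 : ((0 : Nat) : Int) = (0 : Int) := by simp
      rw [← h0]
      exact hmain
  · have hsmall : p.length ≤ 1 := by
      by_contra hbig
      have hex : ∃ x ∈ p, x ≤ pvEMPTY := by
        by_contra hne
        apply hall
        intro x hx
        by_contra hlt
        exact hne ⟨x, hx, not_lt.mp hlt⟩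
      rcases hex with ⟨x, hxp, hxe⟩
      exact hnD ⟨by omega, ⟨x, hxp, by
        have : pvEMPTY = (-1000000 : Int) := rfl
        omega⟩⟩
    match p, hsmall with
    | [], _ => exact pvNil
    | [a], _ => exact pvSingle a

theorem make_sorted_queue_changed : Claim_changed_make_sorted_queue := by
  unfold Claim_changed_make_sorted_queue; decide
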